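-- pv_equiv track=rewrite | github.com/snowwhitewolf/TIL | algorithm/떡먹는호랑이.py | f
-- ===== SOURCE A (Python) =====
-- def f(d,k):
--     for a in range(1,k):
--         for b in range(1,k):
--             if a+b > k:
--                 break
--             lst = [a, b]
--             for i in range(2, d):
--                 lst.append(lst[i - 1] + lst[i - 2])
--             if lst[d-1] == k:
--                 return [a,b]
-- ===== SOURCE B (Python) =====
-- def f(d, k):
--     # Closed-form: the d-th term equals p*a + q*b with Fibonacci coefficients,
--     # so for each a the unique candidate b is solved directly.
--     if d < 3 or k < 2:
--         return None
--     p, q = 1, 1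
--     for _ in range(d - 3):
--         p, q = q, p + q
--     for a in range(1, k):
--         b, r = divmod(k - p * a, q)
--         if r == 0 and b >= 1 and a + b <= k:
--             return [a, b]
--     return None
-- ===== Notes on version B (the rewrite author's own statement) =====
-- stated objective: faster
-- what changed: Instead of testing every pair (a,b) by rebuilding the length-d sequence, B precomputes the Fibonacci coefficients (p,q) of the d-th term once and, for each a, solves p*a+q*b=k for b directly with divmod.
-- crash fix: For d <= -2 and k >= 2, A raises IndexError (lst[d-1] on a 2-element list); B returns None. — e.g. on f(-2, 2): A raises IndexError, B returns none
import Mathlib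
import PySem

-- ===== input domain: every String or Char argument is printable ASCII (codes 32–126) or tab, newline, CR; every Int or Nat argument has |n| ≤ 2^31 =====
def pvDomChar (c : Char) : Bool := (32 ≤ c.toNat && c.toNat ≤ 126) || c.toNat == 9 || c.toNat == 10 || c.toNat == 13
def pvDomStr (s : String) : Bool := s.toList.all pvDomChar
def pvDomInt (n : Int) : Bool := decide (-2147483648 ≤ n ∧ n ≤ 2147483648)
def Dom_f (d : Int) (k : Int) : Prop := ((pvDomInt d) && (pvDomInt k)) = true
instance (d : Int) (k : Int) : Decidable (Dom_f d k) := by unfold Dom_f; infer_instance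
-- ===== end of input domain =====

-- B replaces A's brute-force scan over (a,b) with rebuilt sequences by precomputed
-- Fibonacci coefficients and a direct divmod solve for b (measured objective: faster).

-- ===== PORT A =====
-- lst = [a, b]; for i in range(2, d): lst.append(lst[i-1] + lst[i-2])
def fSeq (a b d : Int) : List Int :=
  (PySem.List.pyRange 2 d 1).foldl
    (fun lst i => lst ++ [PySem.List.pyGetD lst (i - 1) 0 + PySem.List.pyGetD lst (i - 2) 0])
    [a, b]

-- inner 'for b in range(1, k)' loop: break on a+b>k, return [a,b] when lst[d-1]==k
def fInner (d k a : Int) : List Int → Option (List Int)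
  | [] => none
  | b :: bs =>
    if a + b > k then none
    else if PySem.List.pyGetD (fSeq a b d) (d - 1) 0 = k then some [a, b]
    else fInner d k a bs

-- outer 'for a in range(1, k)' loop
def fOuter (d k : Int) : List Int → Option (List Int)
  | [] => none
  | a :: as =>
    match fInner d k a (PySem.List.pyRange 1 k 1) with
    | some r => some r
    | none => fOuter d k as

def f (d : Int) (k : Int) : Option (List Int) :=
  fOuter d k (PySem.List.pyRange 1 k 1)

-- ===== PORT B =====
-- 'for a in range(1, k): b, r = divmod(k - p*a, q); if r == 0 and b >= 1 and a+b <= k: return [a,b]'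
def fAltLoop (p q k : Int) : List Int → Option (List Int)
  | [] => none
  | a :: as =>
    match PySem.Int.divmod? (k - p * a) q with
    | none => none
    | some (b, r) =>
      if r = 0 ∧ 1 ≤ b ∧ a + b ≤ k then some [a, b] else fAltLoop p q k as

def f_alt (d : Int) (k : Int) : Option (List Int) :=
  if d < 3 ∨ k < 2 then none
  else
    let pq := (PySem.List.pyRange 0 (d - 3) 1).foldl (fun pq _ => (pq.2, pq.1 + pq.2)) ((1 : Int), (1 : Int))
    fAltLoop pq.1 pq.2 k (PySem.List.pyRange 1 k 1)

-- ===== PRECONDITION & SPEC =====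
-- Pre_f excludes exactly the inputs where A raises IndexError: for d ≤ -2 and k ≥ 2 the
-- lookup lst[d-1] on the 2-element list [a, b] is out of range.
def Pre_f (d : Int) (k : Int) : Prop := -1 ≤ d ∨ k ≤ 1
instance (d : Int) (k : Int) : Decidable (Pre_f d k) := by unfold Pre_f; infer_instance
def pvWitness_f : Int × Int := (5, 20)

-- For d ≤ -2 and k ≥ 2, A raises IndexError (lst[d-1] on a 2-element list); B returns None.
def Raises_f (d : Int) (k : Int) : Prop := d ≤ -2 ∧ 2 ≤ k
instance (d : Int) (k : Int) : Decidable (Raises_f d k) := by unfold Raises_f; infer_instance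
def pvRaiseWitness_f : Int × Int := (-2, 2)
def pvRaiseWitnessOut_f : Option (List Int) := none

def Spec_f (d : Int) (k : Int) (out : Option (List Int)) : Prop := out = f_alt d k
instance (d : Int) (k : Int) (out : Option (List Int)) : Decidable (Spec_f d k out) := by unfold Spec_f; infer_instance

-- ===== CLAIM (what is proved, stated in full; the proofs are below) =====
def Claim_equal_f : Prop := ∀ (d : Int) (k : Int), Dom_f d k → Pre_f d k → Spec_f d k (f d k)
def Claim_raises_f : Prop := (∀ (d : Int) (k : Int), Dom_f d k → Raises_f d k → ¬ Pre_f d k) ∧ (Dom_f (pvRaiseWitness_f.1) (pvRaiseWitness_f.2) ∧ Raises_f (pvRaiseWitness_f.1) (pvRaiseWitness_f.2) ∧ f_alt (pvRaiseWitness_f.1) (pvRaiseWitness_f.2) = pvRaiseWitnessOut_f)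

-- ===== LEMMAS AND PROOFS =====

-- the Fibonacci-style sequence: g a b 0 = a, g a b 1 = b, g a b (n+2) = g a b n + g a b (n+1)
def gseq (a b : Int) : Nat → Int
  | 0 => a
  | n + 1 => gseq b (a + b) n

-- the (p, q) pair after n iterations of B's coefficient loop
def pqIter : Nat → Int × Int → Int × Int
  | 0, pq => pq
  | n + 1, pq => pqIter n (pq.2, pq.1 + pq.2)

lemma gseq_add2 : ∀ (n : Nat) (a b : Int), gseq a b (n + 2) = gseq a b n + gseq a b (n + 1) := by
  intro n
  induction n with
  | zero => intro a b; simp [gseq]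
  | succ m ih => intro a b; exact ih b (a + b)

lemma pqIter_comm : ∀ (n : Nat) (pq : Int × Int),
    pqIter n (pq.2, pq.1 + pq.2) = ((pqIter n pq).2, (pqIter n pq).1 + (pqIter n pq).2) := by
  intro n
  induction n with
  | zero => intro pq; simp [pqIter]
  | succ m ih => intro pq; simpa using ih (pq.2, pq.1 + pq.2)

lemma pqIter_pos : ∀ (n : Nat), 1 ≤ (pqIter n (1, 1)).1 ∧ 1 ≤ (pqIter n (1, 1)).2 := by
  intro n
  induction n with
  | zero => simp [pqIter]
  | succ m ih =>
    have h : pqIter (m + 1) (1, 1) = ((pqIter m (1, 1)).2, (pqIter m (1, 1)).1 + (pqIter m (1, 1)).2) := by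
      show pqIter m ((1 : Int × Int).2, (1 : Int × Int).1 + (1 : Int × Int).2) = _
      exact pqIter_comm m (1, 1)
    rw [h]; exact ⟨ih.2, by omega⟩

lemma gseq_coeff : ∀ (n : Nat) (a b : Int),
    gseq a b (n + 2) = (pqIter n (1, 1)).1 * a + (pqIter n (1, 1)).2 * b := by
  intro n
  induction n with
  | zero => intro a b; simp [gseq, pqIter]
  | succ m ih =>
    intro a b
    have h1 : gseq a b (m + 3) = gseq b (a + b) (m + 2) := rfl
    have h2 : pqIter (m + 1) (1, 1) = ((pqIter m (1, 1)).2, (pqIter m (1, 1)).1 + (pqIter m (1, 1)).2) := by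
      show pqIter m ((1 : Int × Int).2, (1 : Int × Int).1 + (1 : Int × Int).2) = _
      exact pqIter_comm m (1, 1)
    rw [h1, ih b (a + b), h2]; ring

lemma foldl_pq (l : List Int) : ∀ pq : Int × Int,
    l.foldl (fun pq _ => (pq.2, pq.1 + pq.2)) pq = pqIter l.length pq := by
  induction l with
  | nil => intro pq; rfl
  | cons x xs ih => intro pq; simp only [List.foldl, List.length_cons, pqIter]; exact ih _

lemma fSeq_eq_aux (a b : Int) : ∀ (n : Nat),
    (PySem.List.pyRange 2 (2 + (n : Int)) 1).foldl
      (fun lst i => lst ++ [PySem.List.pyGetD lst (i - 1) 0 + PySem.List.pyGetD lst (i - 2) 0])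
      [a, b]
    = (List.range (n + 2)).map (gseq a b) := by
  intro n
  induction n with
  | zero =>
    rw [show (2 : Int) + ((0 : Nat) : Int) = 2 by norm_num, PySem.List.pyRange_one_eq_nil le_rfl]
    simp [List.range_succ, gseq]
  | succ m ih =>
    have hsplit : PySem.List.pyRange 2 (2 + ((m : Int) + 1)) 1
        = PySem.List.pyRange 2 (2 + (m : Int)) 1 ++ [2 + (m : Int)] := by
      have : (2 : Int) + ((m : Int) + 1) = (2 + (m : Int)) + 1 := by ring
      rw [this, PySem.List.pyRange_one_succ_right (by omega)]
    push_cast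
    push_cast at ih
    rw [hsplit, List.foldl_append, ih]
    simp only [List.foldl]
    have hlen : ((List.range (m + 2)).map (gseq a b)).length = m + 2 := by simp
    have hg1 : PySem.List.pyGetD ((List.range (m + 2)).map (gseq a b)) (2 + (m : Int) - 1) 0
        = gseq a b (m + 1) := by
      have h1 : (2 : Int) + (m : Int) - 1 = ((m + 1 : Nat) : Int) := by push_cast; ring
      rw [h1, PySem.List.pyGetD_natCast]
      simp [List.getD_eq_getElem?_getD]
    have hg2 : PySem.List.pyGetD ((List.range (m + 2)).map (gseq a b)) (2 + (m : Int) - 2) 0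
        = gseq a b m := by
      have h1 : (2 : Int) + (m : Int) - 2 = ((m : Nat) : Int) := by ring
      rw [h1, PySem.List.pyGetD_natCast]
      simp [List.getD_eq_getElem?_getD]
    rw [hg1, hg2]
    have : List.range (m + 1 + 2) = List.range (m + 2) ++ [m + 2] := by
      simpa using List.range_succ (n := m + 2)
    rw [this, List.map_append]
    simp [gseq_add2 m a b, Int.add_comm]
  
lemma fSeq_eq (a b d : Int) (hd : 2 ≤ d) :
    fSeq a b d = (List.range d.toNat).map (gseq a b) := by
  have h2 : (2 : Int) + ((d - 2).toNat : Int) = d := by omega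
  have := fSeq_eq_aux a b (d - 2).toNat
  rw [h2] at this
  have hn : (d - 2).toNat + 2 = d.toNat := by omega
  rw [hn] at this
  exact this

-- the checked value lst[d-1] equals p*a + q*b with (p,q) = pqIter (d-3).toNat (1,1)
lemma check_val (a b d : Int) (hd : 3 ≤ d) :
    PySem.List.pyGetD (fSeq a b d) (d - 1) 0
      = (pqIter (d - 3).toNat (1, 1)).1 * a + (pqIter (d - 3).toNat (1, 1)).2 * b := by
  rw [fSeq_eq a b d (by omega)]
  have h1 : (d - 1 : Int) = (((d - 1).toNat : Nat) : Int) := by omega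
  rw [h1, PySem.List.pyGetD_natCast]
  have h3 : (d - 1).toNat = (d - 3).toNat + 2 := by omega
  rw [h3]
  have hlt : (d - 3).toNat + 2 < d.toNat := by omega
  rw [List.getD_eq_getElem?_getD, List.getElem?_map, List.getElem?_range hlt]
  simp [gseq_coeff]

-- A's inner loop returns none when B's solvability condition fails
lemma inner_none (d k a p q : Int) (hq : 1 ≤ q)
    (hval : ∀ b : Int, PySem.List.pyGetD (fSeq a b d) (d - 1) 0 = p * a + q * b)
    (hfail : ¬ (PySem.Int.mod (k - p * a) q = 0 ∧ 1 ≤ PySem.Int.floordiv (k - p * a) q ∧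
                a + PySem.Int.floordiv (k - p * a) q ≤ k)) :
    ∀ (n : Nat) (c : Int), 1 ≤ c → k - c ≤ n → fInner d k a (PySem.List.pyRange c k 1) = none := by
  intro n
  induction n with
  | zero =>
    intro c _ hbound
    rw [PySem.List.pyRange_one_eq_nil (by omega)]
    rfl
  | succ m ih =>
    intro c hc hbound
    by_cases hck : c < k
    · rw [PySem.List.pyRange_one_cons hck]
      show (if a + c > k then none
        else if PySem.List.pyGetD (fSeq a c d) (d - 1) 0 = k then some [a, c]
        else fInner d k a (PySem.List.pyRange (c + 1) k 1)) = none
      by_cases hbr : a + c > k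
      · simp [hbr]
      · rw [if_neg hbr, hval c]
        have hne : ¬ (p * a + q * c = k) := by
          intro heq
          have hdvd : q ∣ (k - p * a) := ⟨c, by omega⟩
          have hmod : PySem.Int.mod (k - p * a) q = 0 :=
            (PySem.Int.mod_eq_zero_iff_dvd _ _).mpr hdvd
          have hfd : PySem.Int.floordiv (k - p * a) q = c := by
            rw [PySem.Int.floordiv_eq_iff_of_pos (by omega : (0 : Int) < q)]
            constructor <;> nlinarith
          exact hfail ⟨hmod, by rw [hfd]; omega, by rw [hfd]; omega⟩
        rw [if_neg hne]
        exact ih (c + 1) (by omega) (by omega)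
    · rw [PySem.List.pyRange_one_eq_nil (by omega)]
      rfl

-- A's inner loop finds exactly B's solved b when the condition holds
lemma inner_some (d k a p q : Int) (hq : 1 ≤ q) (ha : 1 ≤ a)
    (hval : ∀ b : Int, PySem.List.pyGetD (fSeq a b d) (d - 1) 0 = p * a + q * b)
    (hmod : PySem.Int.mod (k - p * a) q = 0)
    (_hb1 : 1 ≤ PySem.Int.floordiv (k - p * a) q)
    (hab : a + PySem.Int.floordiv (k - p * a) q ≤ k) :
    ∀ (n : Nat) (c : Int), 1 ≤ c → c ≤ PySem.Int.floordiv (k - p * a) q → k - c ≤ n →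
      fInner d k a (PySem.List.pyRange c k 1) = some [a, PySem.Int.floordiv (k - p * a) q] := by
  have hqb : q * PySem.Int.floordiv (k - p * a) q = k - p * a := by
    have := PySem.Int.floordiv_mul_add_mod (k - p * a) q
    rw [hmod] at this; linarith
  intro n
  induction n with
  | zero =>
    intro c hc hcb hbound
    exfalso
    have : PySem.Int.floordiv (k - p * a) q < k := by omega
    omega
  | succ m ih =>
    intro c hc hcb hbound
    have hck : c < k := by omega
    rw [PySem.List.pyRange_one_cons hck]
    show (if a + c > k then none
      else if PySem.List.pyGetD (fSeq a c d) (d - 1) 0 = k then some [a, c]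
      else fInner d k a (PySem.List.pyRange (c + 1) k 1)) = _
    rw [if_neg (by omega), hval c]
    by_cases hcb0 : c = PySem.Int.floordiv (k - p * a) q
    · rw [if_pos (by rw [hcb0]; linarith), hcb0]
    · have hlt : c < PySem.Int.floordiv (k - p * a) q := by omega
      rw [if_neg (by nlinarith)]
      exact ih (c + 1) (by omega) (by omega) (by omega)

-- divmod? with a positive divisor
lemma divmod_pos (x q : Int) (hq : 1 ≤ q) :
    PySem.Int.divmod? x q = some (PySem.Int.floordiv x q, PySem.Int.mod x q) := by
  have h0 : ¬ q = 0 := by omega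
  simp [PySem.Int.divmod?, PySem.Int.floordiv, PySem.Int.mod, h0]

-- the two outer loops agree element by element (d ≥ 3 case)
lemma outer_eq (d k p q : Int) (hq : 1 ≤ q)
    (hval : ∀ a b : Int, PySem.List.pyGetD (fSeq a b d) (d - 1) 0 = p * a + q * b) :
    ∀ (n : Nat) (c : Int), 1 ≤ c → k - c ≤ n →
      fOuter d k (PySem.List.pyRange c k 1) = fAltLoop p q k (PySem.List.pyRange c k 1) := by
  intro n
  induction n with
  | zero =>
    intro c _ hbound
    rw [PySem.List.pyRange_one_eq_nil (by omega)]
    rfl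
  | succ m ih =>
    intro c hc hbound
    by_cases hck : c < k
    · rw [PySem.List.pyRange_one_cons hck]
      show (match fInner d k c (PySem.List.pyRange 1 k 1) with
        | some r => some r
        | none => fOuter d k (PySem.List.pyRange (c + 1) k 1)) = _
      have hB : fAltLoop p q k (c :: PySem.List.pyRange (c + 1) k 1)
          = if PySem.Int.mod (k - p * c) q = 0 ∧ 1 ≤ PySem.Int.floordiv (k - p * c) q ∧
              c + PySem.Int.floordiv (k - p * c) q ≤ k
            then some [c, PySem.Int.floordiv (k - p * c) q]
            else fAltLoop p q k (PySem.List.pyRange (c + 1) k 1) := by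
        show (match PySem.Int.divmod? (k - p * c) q with
          | none => none
          | some (b, r) =>
            if r = 0 ∧ 1 ≤ b ∧ c + b ≤ k then some [c, b]
            else fAltLoop p q k (PySem.List.pyRange (c + 1) k 1)) = _
        rw [divmod_pos _ _ hq]
      by_cases hcond : PySem.Int.mod (k - p * c) q = 0 ∧ 1 ≤ PySem.Int.floordiv (k - p * c) q ∧
          c + PySem.Int.floordiv (k - p * c) q ≤ k
      · have hA := inner_some d k c p q hq hc (fun b => hval c b) hcond.1 hcond.2.1 hcond.2.2
          (k - 1).toNat 1 (by omega) hcond.2.1 (by omega)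
        rw [hA, hB, if_pos hcond]
      · have hA := inner_none d k c p q hq (fun b => hval c b) hcond
          (k - 1).toNat 1 (by omega) (by omega)
        rw [hA, hB, if_neg hcond]
        exact ih (c + 1) (by omega) (by omega)
    · rw [PySem.List.pyRange_one_eq_nil (by omega)]
      rfl

-- for -1 ≤ d ≤ 2 the checked value is a or b, so with a, b < k nothing is returned
lemma check_small (a b d : Int) (hd1 : -1 ≤ d) (hd2 : d ≤ 2) :
    PySem.List.pyGetD (fSeq a b d) (d - 1) 0 = a ∨
    PySem.List.pyGetD (fSeq a b d) (d - 1) 0 = b := by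
  have hseq : fSeq a b d = [a, b] := by
    unfold fSeq
    rw [PySem.List.pyRange_one_eq_nil (by omega)]
    rfl
  rw [hseq]
  interval_cases d
  · left; rfl
  · right; rfl
  · left; rfl
  · right; rfl

lemma inner_small (d k a : Int) (hd1 : -1 ≤ d) (hd2 : d ≤ 2) (ha : a < k) :
    ∀ (n : Nat) (c : Int), 1 ≤ c → k - c ≤ n → fInner d k a (PySem.List.pyRange c k 1) = none := by
  intro n
  induction n with
  | zero =>
    intro c _ hbound
    rw [PySem.List.pyRange_one_eq_nil (by omega)]
    rfl
  | succ m ih =>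
    intro c hc hbound
    by_cases hck : c < k
    · rw [PySem.List.pyRange_one_cons hck]
      show (if a + c > k then none
        else if PySem.List.pyGetD (fSeq a c d) (d - 1) 0 = k then some [a, c]
        else fInner d k a (PySem.List.pyRange (c + 1) k 1)) = none
      by_cases hbr : a + c > k
      · simp [hbr]
      · rw [if_neg hbr]
        have hne : ¬ (PySem.List.pyGetD (fSeq a c d) (d - 1) 0 = k) := by
          rcases check_small a c d hd1 hd2 with h | h <;> rw [h] <;> omega
        rw [if_neg hne]
        exact ih (c + 1) (by omega) (by omega)
    · rw [PySem.List.pyRange_one_eq_nil (by omega)]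
      rfl

lemma outer_small (d k : Int) (hd1 : -1 ≤ d) (hd2 : d ≤ 2) :
    ∀ (n : Nat) (c : Int), 1 ≤ c → k - c ≤ n → fOuter d k (PySem.List.pyRange c k 1) = none := by
  intro n
  induction n with
  | zero =>
    intro c _ hbound
    rw [PySem.List.pyRange_one_eq_nil (by omega)]
    rfl
  | succ m ih =>
    intro c hc hbound
    by_cases hck : c < k
    · rw [PySem.List.pyRange_one_cons hck]
      show (match fInner d k c (PySem.List.pyRange 1 k 1) with
        | some r => some r
        | none => fOuter d k (PySem.List.pyRange (c + 1) k 1)) = none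
      rw [inner_small d k c hd1 hd2 hck (k - 1).toNat 1 (by omega) (by omega)]
      exact ih (c + 1) (by omega) (by omega)
    · rw [PySem.List.pyRange_one_eq_nil (by omega)]
      rfl

-- ===== VERDICT (by name: the statement is the Claim_ definition above) =====
theorem f_raises : Claim_raises_f := by
  unfold Claim_raises_f
  refine ⟨?_, by decide⟩
  intro d k _ hr hpre
  have hpre' : -1 ≤ d ∨ k ≤ 1 := hpre
  have hr' : d ≤ -2 ∧ 2 ≤ k := hr
  rcases hpre' with h | h <;> omega

theorem f_spec : Claim_equal_f := by
  intro d k hdom hpre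
  show f d k = f_alt d k
  by_cases hd : d < 3
  · rw [f_alt, if_pos (Or.inl hd)]
    by_cases hk : k ≤ 1
    · rw [f, PySem.List.pyRange_one_eq_nil (by omega)]
      rfl
    · -- d ≤ -2 is excluded: there A raises (f_raises); here Pre_f forces -1 ≤ d
      have hd1 : -1 ≤ d := by
        by_contra hneg
        exact f_raises.1 d k hdom ⟨by omega, by omega⟩ hpre
      exact outer_small d k hd1 (by omega) (k - 1).toNat 1 (by omega) (by omega)
  · by_cases hk2 : k < 2
    · rw [f_alt, if_pos (Or.inr hk2), f, PySem.List.pyRange_one_eq_nil (by omega)]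
      rfl
    · have hd3 : 3 ≤ d := by omega
      rw [f, f_alt, if_neg (by omega : ¬ (d < 3 ∨ k < 2))]
      have hlen : (PySem.List.pyRange 0 (d - 3) 1).length = (d - 3).toNat := by
        rw [PySem.List.length_pyRange_one]; congr 1; omega
      rw [foldl_pq, hlen]
      have hval : ∀ a b : Int, PySem.List.pyGetD (fSeq a b d) (d - 1) 0
          = (pqIter (d - 3).toNat (1, 1)).1 * a + (pqIter (d - 3).toNat (1, 1)).2 * b :=
        fun a b => check_val a b d hd3
      exact outer_eq d k _ _ (pqIter_pos (d - 3).toNat).2 hval (k - 1).toNat 1 (by omega) (by omega)
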